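-- pv_equiv track=rewrite | github.com/emilycardwell/final-project-cleaning | py_files/string_cleaning.py | dashes_commas_colons
-- ===== SOURCE A (Python) =====
-- def dashes_commas_colons(song):
--     # Fix dashes, colons, and commas
--     for idx, chord in enumerate(song):
--         if '--' in chord:
--             song[idx] = chord.split('--')[0]
--         elif '-' in chord:
--             linechords = chord.split('-')
--             song[idx] = linechords[0]
--             i = idx + 1
--             for lc in linechords[1:]:
--                 song.insert(i, lc)
--                 i += 1
--         elif ',' in chord:
--             linechords = chord.split(',')
--             song[idx] = linechords[0]
--             i = idx + 1
--             for lc in linechords[1:]: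
--                 song.insert(i, lc)
--                 i += 1
--         else:
--             pass
--     return song
-- ===== SOURCE B (Python) =====
-- def dashes_commas_colons(song):
--     # Flat two-level expansion instead of inserting into the list being
--     # iterated: a '--' chord keeps only its prefix; a '-' chord keeps its
--     # first part and each later part is comma-split (parts of a '-' split
--     # can still hold commas but never a dash); a ',' chord just splits.
--     # Mutates song in place and returns it.
--     out = []
--     for chord in song:
--         if '--' in chord:
--             out.append(chord.split('--')[0])
--         elif '-' in chord:
--             parts = chord.split('-')
--             out.append(parts[0])
--             for p in parts[1:]:
--                 out.extend(p.split(','))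
--         elif ',' in chord:
--             out.extend(chord.split(','))
--         else:
--             out.append(chord)
--     song[:] = out
--     return song
-- ===== Notes on version B (the rewrite author's own statement) =====
-- stated objective: simpler
-- what changed: Replaces A's insert-into-the-list-being-iterated worklist (enumerate revisiting freshly inserted elements) with a flat non-recursive per-chord expansion: '--' keeps the prefix, '-' keeps the first part and comma-splits the later parts (which can never contain a dash), ',' just splits; the expansions are concatenated in one pass.
import Mathlib
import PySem

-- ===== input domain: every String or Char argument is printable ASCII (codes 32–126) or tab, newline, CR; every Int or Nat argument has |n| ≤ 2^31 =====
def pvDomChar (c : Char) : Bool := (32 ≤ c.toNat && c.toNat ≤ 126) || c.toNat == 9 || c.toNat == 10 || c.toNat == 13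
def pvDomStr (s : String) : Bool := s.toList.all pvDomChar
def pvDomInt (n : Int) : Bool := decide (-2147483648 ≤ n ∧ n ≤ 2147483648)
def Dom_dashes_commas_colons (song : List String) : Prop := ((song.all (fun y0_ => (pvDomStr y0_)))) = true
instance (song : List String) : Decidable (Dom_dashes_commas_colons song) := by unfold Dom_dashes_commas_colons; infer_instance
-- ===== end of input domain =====

-- B replaces A's insert-into-the-list-being-iterated worklist loop by a flat,
-- non-recursive per-chord expansion (objective: simpler). Both Pythons mutate
-- `song` in place to the same final contents and return it; the theorems are
-- about the returned value.

-- Python s.split(sep) for a nonempty separator (PySem.Str.split? returns `some` of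
-- exactly this list when sep ≠ "").
def pySplit (s sep : String) : List String :=
  (PySem.Chars.splitOn s.toList sep.toList).map String.ofList

-- ── termination machinery for port A (cited by its decreasing_by) ──
-- Weight of a list of chord strings: sum of (length + 1).
def chordW (l : List String) : Nat := (l.map (fun s => s.toList.length + 1)).sum

def Wc (ps : List (List Char)) : Nat := (ps.map (fun p => p.length + 1)).sum

theorem Wc_cons (p : List Char) (ps : List (List Char)) :
    Wc (p :: ps) = p.length + 1 + Wc ps := by simp [Wc]

theorem Wc_reverse (ps : List (List Char)) : Wc ps.reverse = Wc ps := by simp [Wc]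

theorem go_weight (sep : List Char) (hsep : sep ≠ []) :
    ∀ fuel (l cur : List Char) (acc : List (List Char)), l.length < fuel →
      Wc (PySem.Chars.splitOn.go sep fuel l cur acc) ≤ Wc acc + cur.length + 1 + l.length := by
  intro fuel
  induction fuel with
  | zero => intro l cur acc h; omega
  | succ n ih =>
    intro l cur acc h
    match l with
    | [] =>
      rw [PySem.Chars.splitOn.go]
      · rw [Wc_reverse, Wc_cons]
        simp; omega
      · omega
    | c :: rest =>
      rw [PySem.Chars.splitOn.go]
      split
      · rename_i hp
        have hpre : sep <+: (c :: rest) := List.isPrefixOf_iff_prefix.mp hp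
        have hk : sep.length ≤ (c :: rest).length := hpre.length_le
        have hk1 : 1 ≤ sep.length := List.length_pos_iff.mpr hsep
        have hdrop : (List.drop sep.length (c :: rest)).length
            = (c :: rest).length - sep.length := by simp
        have := ih (List.drop sep.length (c :: rest)) [] (cur.reverse :: acc)
          (by rw [hdrop]; simp at h ⊢; omega)
        rw [Wc_cons] at this
        simp [List.length_reverse] at this ⊢
        omega
      · have := ih rest (c :: cur) acc (by simpa using Nat.lt_of_succ_lt_succ h)
        simp at this ⊢
        omega

theorem splitOn_weight (s sep : List Char) (hsep : sep ≠ []) :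
    Wc (PySem.Chars.splitOn s sep) ≤ s.length + 1 := by
  rw [PySem.Chars.splitOn]
  have := go_weight sep hsep (s.length + 1) s [] [] (by omega)
  simp [Wc] at this ⊢
  omega

-- weight of the tail parts of a split is at most the length of the split string
theorem tailW_le (s sep : String) (hsep : sep.toList ≠ []) :
    chordW (pySplit s sep).tail ≤ s.toList.length := by
  have hW := splitOn_weight s.toList sep.toList hsep
  have hEq : chordW (pySplit s sep).tail = Wc (PySem.Chars.splitOn s.toList sep.toList).tail := by
    rw [chordW, Wc, pySplit, ← List.map_tail, List.map_map]
    simp [Function.comp_def]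
  rw [hEq]
  cases h : PySem.Chars.splitOn s.toList sep.toList with
  | nil => simp [Wc]
  | cons p ps =>
    rw [h] at hW
    rw [Wc_cons] at hW
    simp only [List.tail_cons]
    omega

-- the measure drops when a chord is replaced by the tail parts of its split
theorem chordW_split_lt (chord : String) (rest : List String) (sep : String)
    (hsep : sep.toList ≠ []) :
    chordW ((pySplit chord sep).tail ++ rest) < chordW (chord :: rest) := by
  have h := tailW_le chord sep hsep
  rw [chordW, List.map_append, List.sum_append]
  rw [chordW] at h
  simp only [chordW, List.map_cons, List.sum_cons]
  omega

-- ===== PORT A =====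
-- Transcription of A's for-loop: revisiting index idx+1 after `song.insert` means the
-- freshly inserted tail parts are processed next, before the old remainder — exactly
-- this worklist recursion.  linechords[0] never raises (split is nonempty), = headI.
def dcLoopA : List String → List String
  | [] => []
  | chord :: rest =>
    if PySem.Str.isIn "--" chord then
      (pySplit chord "--").headI :: dcLoopA rest
    else if PySem.Str.isIn "-" chord then
      (pySplit chord "-").headI :: dcLoopA ((pySplit chord "-").tail ++ rest)
    else if PySem.Str.isIn "," chord then
      (pySplit chord ",").headI :: dcLoopA ((pySplit chord ",").tail ++ rest)
    else
      chord :: dcLoopA rest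
termination_by l => chordW l
decreasing_by
  all_goals first
    | ((simp only [chordW, List.map_cons, List.sum_cons]); omega)
    | exact chordW_split_lt _ _ "-" (by decide)
    | exact chordW_split_lt _ _ "," (by decide)

def dashes_commas_colons (song : List String) : List String := dcLoopA song

-- ===== PORT B =====
-- Source B's loop body: what one chord contributes to `out` (no recursion: parts of a
-- '-' split never contain '-', so only a comma-split of the later parts remains).
def expandB (chord : String) : List String :=
  if PySem.Str.isIn "--" chord then
    [(pySplit chord "--").headI]
  else if PySem.Str.isIn "-" chord then
    (pySplit chord "-").headI :: ((pySplit chord "-").tail).flatMap (fun p => pySplit p ",")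
  else if PySem.Str.isIn "," chord then
    pySplit chord ","
  else
    [chord]

-- Source B: out accumulated left to right (append/extend), then song[:] = out; return song
def dashes_commas_colons_alt (song : List String) : List String :=
  song.foldl (fun out c => out ++ expandB c) []

-- ===== PRECONDITION & SPEC =====
def Spec_dashes_commas_colons (song : List String) (out : List String) : Prop := out = dashes_commas_colons_alt song
instance (song : List String) (out : List String) : Decidable (Spec_dashes_commas_colons song out) := by unfold Spec_dashes_commas_colons; infer_instance

-- ===== CLAIM (what is proved, stated in full; the proofs are below) =====
def Claim_equal_dashes_commas_colons : Prop := ∀ (song : List String), Dom_dashes_commas_colons song → Spec_dashes_commas_colons song (dashes_commas_colons song)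

-- ===== LEMMAS AND PROOFS =====

-- chars of every part of splitOn.go come from l, cur or acc
theorem go_subset (sep : List Char) :
    ∀ fuel (l cur : List Char) (acc : List (List Char)) (p : List Char),
      p ∈ PySem.Chars.splitOn.go sep fuel l cur acc →
      ∀ x ∈ p, x ∈ l ∨ x ∈ cur ∨ ∃ q ∈ acc, x ∈ q := by
  intro fuel
  induction fuel with
  | zero =>
    intro l cur acc p hp x hx
    rw [PySem.Chars.splitOn.go] at hp
    simp at hp
    rcases hp with hp | hp
    · exact Or.inr (Or.inr ⟨p, hp, hx⟩)
    · subst hp; simp at hx; tauto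
  | succ n ih =>
    intro l cur acc p hp x hx
    match l with
    | [] =>
      rw [PySem.Chars.splitOn.go] at hp
      · simp at hp
        rcases hp with hp | hp
        · exact Or.inr (Or.inr ⟨p, hp, hx⟩)
        · subst hp; simp at hx; tauto
      · omega
    | c :: rest =>
      rw [PySem.Chars.splitOn.go] at hp
      split at hp
      · have := ih (List.drop sep.length (c :: rest)) [] (cur.reverse :: acc) p hp x hx
        rcases this with h | h | ⟨q, hq, hxq⟩
        · exact Or.inl (List.mem_of_mem_drop h)
        · simp at h
        · simp at hq
          rcases hq with hq | hq
          · subst hq; simp at hxq; tauto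
          · exact Or.inr (Or.inr ⟨q, hq, hxq⟩)
      · have := ih rest (c :: cur) acc p hp x hx
        rcases this with h | h | h
        · exact Or.inl (by simp [h])
        · simp at h
          rcases h with h | h
          · exact Or.inl (by simp [h])
          · tauto
        · tauto

-- for a single-char separator no part of splitOn.go contains the separator char
theorem go_not_mem (c : Char) :
    ∀ fuel (l cur : List Char) (acc : List (List Char)), l.length < fuel →
      c ∉ cur → (∀ q ∈ acc, c ∉ q) →
      ∀ p ∈ PySem.Chars.splitOn.go [c] fuel l cur acc, c ∉ p := by
  intro fuel
  induction fuel with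
  | zero => intro l cur acc h; omega
  | succ n ih =>
    intro l cur acc h hcur hacc p hp
    match l with
    | [] =>
      rw [PySem.Chars.splitOn.go] at hp
      · simp at hp
        rcases hp with hp | hp
        · exact hacc p hp
        · subst hp; simpa using hcur
      · omega
    | d :: rest =>
      rw [PySem.Chars.splitOn.go] at hp
      split at hp
      · refine ih (List.drop 1 (d :: rest)) [] (cur.reverse :: acc) ?_ (by simp) ?_ p hp
        · simp at h ⊢; omega
        · intro q hq
          simp at hq
          rcases hq with hq | hq
          · subst hq; simpa using hcur
          · exact hacc q hq
      · rename_i hnp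
        have hdc : d ≠ c := by
          intro hdc
          exact hnp (by simp [List.isPrefixOf, hdc])
        refine ih rest (d :: cur) acc (by simpa using Nat.lt_of_succ_lt_succ h) ?_ hacc p hp
        simp
        exact ⟨fun hh => hdc hh.symm, hcur⟩

-- if the separator char does not occur, go yields the single accumulated piece
theorem go_no_occur (c : Char) :
    ∀ fuel (l cur : List Char) (acc : List (List Char)), l.length < fuel → c ∉ l →
      PySem.Chars.splitOn.go [c] fuel l cur acc = ((cur.reverse ++ l) :: acc).reverse := by
  intro fuel
  induction fuel with
  | zero => intro l cur acc h; omega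
  | succ n ih =>
    intro l cur acc h hc
    match l with
    | [] =>
      rw [PySem.Chars.splitOn.go]
      · simp
      · omega
    | d :: rest =>
      rw [PySem.Chars.splitOn.go]
      have hdc : d ≠ c := by simp at hc; tauto
      rw [if_neg (by simp [List.isPrefixOf]; intro hh; exact hdc hh.symm)]
      rw [ih rest (d :: cur) acc (by simpa using Nat.lt_of_succ_lt_succ h) (by simp at hc; tauto)]
      simp

theorem go_ne_nil (sep : List Char) :
    ∀ fuel (l cur : List Char) (acc : List (List Char)),
      PySem.Chars.splitOn.go sep fuel l cur acc ≠ [] := by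
  intro fuel
  induction fuel with
  | zero => intro l cur acc; rw [PySem.Chars.splitOn.go]; simp
  | succ n ih =>
    intro l cur acc
    match l with
    | [] =>
      rw [PySem.Chars.splitOn.go]
      · simp
      · omega
    | c :: rest =>
      rw [PySem.Chars.splitOn.go]
      split
      · exact ih _ _ _
      · exact ih _ _ _

theorem splitOn_subset (s sep p : List Char) (hp : p ∈ PySem.Chars.splitOn s sep) :
    ∀ x ∈ p, x ∈ s := by
  rw [PySem.Chars.splitOn] at hp
  intro x hx
  rcases go_subset sep (s.length + 1) s [] [] p hp x hx with h | h | ⟨q, hq, _⟩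
  · exact h
  · simp at h
  · simp at hq

theorem splitOn_not_mem (s : List Char) (c : Char) (p : List Char)
    (hp : p ∈ PySem.Chars.splitOn s [c]) : c ∉ p := by
  rw [PySem.Chars.splitOn] at hp
  exact go_not_mem c (s.length + 1) s [] [] (by omega) (by simp) (by simp) p hp

theorem splitOn_of_not_mem (s : List Char) (c : Char) (hc : c ∉ s) :
    PySem.Chars.splitOn s [c] = [s] := by
  rw [PySem.Chars.splitOn, go_no_occur c (s.length + 1) s [] [] (by omega) hc]
  simp

-- bridge: membership in a string  ↔  single-char `in`
theorem isIn_single (c : Char) (cs : String) (sep : String) (hsep : sep.toList = [c]) :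
    PySem.Str.isIn sep cs = true ↔ c ∈ cs.toList := by
  rw [PySem.Str.isIn, PySem.Chars.isIn_iff_infix, hsep]
  constructor
  · intro h; exact h.mem (by simp)
  · intro h
    obtain ⟨l₁, l₂, he⟩ := List.mem_iff_append.mp h
    rw [he]
    exact ⟨l₁, l₂, by simp⟩

theorem isIn_ddash_dash (cs : String) (h : PySem.Str.isIn "--" cs = true) :
    '-' ∈ cs.toList := by
  rw [PySem.Str.isIn, PySem.Chars.isIn_iff_infix] at h
  have hsub : ("--".toList : List Char) ⊆ cs.toList := h.sublist.subset
  exact hsub (by decide)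

theorem mem_pySplit_no_char (s : String) (sep : String) (c : Char) (hsep : sep.toList = [c])
    (p : String) (hp : p ∈ pySplit s sep) : c ∉ p.toList := by
  rw [pySplit, hsep] at hp
  obtain ⟨cs, hcs, rfl⟩ := List.mem_map.mp hp
  simpa using splitOn_not_mem s.toList c cs hcs

theorem mem_pySplit_subset (s sep p : String) (hp : p ∈ pySplit s sep) :
    ∀ x ∈ p.toList, x ∈ s.toList := by
  rw [pySplit] at hp
  obtain ⟨cs, hcs, rfl⟩ := List.mem_map.mp hp
  simpa using splitOn_subset s.toList sep.toList cs hcs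

theorem pySplit_ne_nil (s sep : String) : pySplit s sep ≠ [] := by
  rw [pySplit, PySem.Chars.splitOn]
  simp [go_ne_nil]

theorem pySplit_of_no_char (s : String) (sep : String) (c : Char) (hsep : sep.toList = [c])
    (hc : c ∉ s.toList) : pySplit s sep = [s] := by
  rw [pySplit, hsep, splitOn_of_not_mem s.toList c hc]
  simp

-- dcLoopA walks past a block of separator-free chords unchanged
theorem dcLoopA_plain : ∀ (ps rest : List String),
    (∀ p ∈ ps, '-' ∉ p.toList ∧ ',' ∉ p.toList) →
    dcLoopA (ps ++ rest) = ps ++ dcLoopA rest := by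
  intro ps
  induction ps with
  | nil => intro rest _; simp
  | cons p ps ih =>
    intro rest hps
    obtain ⟨hd, hc⟩ := hps p (by simp)
    have h1 : ¬ PySem.Str.isIn "--" p = true := fun h => hd (isIn_ddash_dash p h)
    have h2 : ¬ PySem.Str.isIn "-" p = true := fun h => hd ((isIn_single '-' p "-" rfl).mp h)
    have h3 : ¬ PySem.Str.isIn "," p = true := fun h => hc ((isIn_single ',' p "," rfl).mp h)
    rw [List.cons_append, dcLoopA, if_neg h1, if_neg h2, if_neg h3,
      ih rest (fun q hq => hps q (by simp [hq]))]
    simp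

-- dcLoopA on the tail parts of a '-'-split: each part is dash-free, so it is
-- either kept or comma-split, and the comma parts are separator-free
theorem dcLoopA_dash_parts : ∀ (ps rest : List String),
    (∀ p ∈ ps, '-' ∉ p.toList) →
    dcLoopA (ps ++ rest) = ps.flatMap (fun p => pySplit p ",") ++ dcLoopA rest := by
  intro ps
  induction ps with
  | nil => intro rest _; simp
  | cons p ps ih =>
    intro rest hps
    have hd : '-' ∉ p.toList := hps p (by simp)
    have h1 : ¬ PySem.Str.isIn "--" p = true := fun h => hd (isIn_ddash_dash p h)
    have h2 : ¬ PySem.Str.isIn "-" p = true := fun h => hd ((isIn_single '-' p "-" rfl).mp h)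
    have ihps : dcLoopA (ps ++ rest) = ps.flatMap (fun q => pySplit q ",") ++ dcLoopA rest :=
      ih rest (fun q hq => hps q (by simp [hq]))
    rw [List.cons_append, dcLoopA, if_neg h1, if_neg h2]
    by_cases h3 : PySem.Str.isIn "," p = true
    · rw [if_pos h3]
      have hplain : ∀ q ∈ (pySplit p ",").tail, '-' ∉ q.toList ∧ ',' ∉ q.toList := by
        intro q hq
        have hq' : q ∈ pySplit p "," := List.mem_of_mem_tail hq
        refine ⟨fun hx => hd (mem_pySplit_subset p "," q hq' '-' hx), ?_⟩
        exact mem_pySplit_no_char p "," ',' rfl q hq'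
      rw [dcLoopA_plain _ _ hplain, ihps]
      have hfull : (pySplit p ",").headI :: (pySplit p ",").tail = pySplit p "," := by
        cases h : pySplit p "," with
        | nil => exact absurd h (pySplit_ne_nil p ",")
        | cons a as => simp
      rw [List.flatMap_cons]
      conv_rhs => rw [← hfull]
      simp
    · rw [if_neg h3]
      have hc : ',' ∉ p.toList := fun h => h3 ((isIn_single ',' p "," rfl).mpr h)
      rw [ihps]
      simp [pySplit_of_no_char p "," ',' rfl hc]

-- main equivalence: the worklist recursion equals per-chord flat expansion
theorem dcLoopA_eq_flatMap : ∀ l : List String, dcLoopA l = l.flatMap expandB := by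
  intro l
  induction l with
  | nil => rw [dcLoopA]; simp
  | cons chord rest ih =>
    rw [dcLoopA, List.flatMap_cons, expandB]
    by_cases h1 : PySem.Str.isIn "--" chord
    · rw [if_pos h1, if_pos h1, ih]; simp
    · rw [if_neg h1, if_neg h1]
      by_cases h2 : PySem.Str.isIn "-" chord
      · rw [if_pos h2, if_pos h2]
        have hparts : ∀ p ∈ (pySplit chord "-").tail, '-' ∉ p.toList := by
          intro p hp
          exact mem_pySplit_no_char chord "-" '-' rfl p (List.mem_of_mem_tail hp)
        rw [dcLoopA_dash_parts _ _ hparts, ih]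
        simp
      · rw [if_neg h2, if_neg h2]
        by_cases h3 : PySem.Str.isIn "," chord
        · rw [if_pos h3, if_pos h3]
          have hd : '-' ∉ chord.toList := fun h => h2 ((isIn_single '-' chord "-" rfl).mpr h)
          have hplain : ∀ q ∈ (pySplit chord ",").tail, '-' ∉ q.toList ∧ ',' ∉ q.toList := by
            intro q hq
            have hq' : q ∈ pySplit chord "," := List.mem_of_mem_tail hq
            refine ⟨fun hx => hd (mem_pySplit_subset chord "," q hq' '-' hx), ?_⟩
            exact mem_pySplit_no_char chord "," ',' rfl q hq'
          rw [dcLoopA_plain _ _ hplain, ih]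
          have hfull : (pySplit chord ",").headI :: (pySplit chord ",").tail
              = pySplit chord "," := by
            cases h : pySplit chord "," with
            | nil => exact absurd h (pySplit_ne_nil chord ",")
            | cons a as => simp
          conv_rhs => rw [← hfull]
          simp
        · rw [if_neg h3, if_neg h3, ih]; simp

theorem alt_eq_flatMap (song : List String) :
    dashes_commas_colons_alt song = song.flatMap expandB := by
  rw [dashes_commas_colons_alt]
  rw [PySem.List.foldl_append_eq_flatMap]
  simp

-- ===== VERDICT (by name: the statement is the Claim_ definition above) =====
theorem dashes_commas_colons_spec : Claim_equal_dashes_commas_colons := by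
  intro song _
  unfold Spec_dashes_commas_colons dashes_commas_colons
  rw [alt_eq_flatMap]
  exact dcLoopA_eq_flatMap song
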